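-- pv_equiv track=rewrite | github.com/v1-nce/transfer | softcopy_note.py | sum_along
-- ===== SOURCE A (Python) =====
-- def sum_along(axis, arr):
--     def helper(axis, arr, depth):
--         if depth == axis:
--             result = arr[0]
--             for i in range(1, len(arr)):
--                 result = add(result, arr[i])
--             return result
--         return [helper(axis, sub, depth + 1) for sub in arr]
--     def add(a, b):
--         if isinstance(a, list) and isinstance(b, list):
--             return [add(a[i], b[i]) for i in range(len(a))]
--         else:
--             return a + b
--     return helper(axis, arr, 0)
-- ===== SOURCE B (Python) =====
-- def sum_along(axis, arr):
--     if axis == 0: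
--         return [sum(row[j] for row in arr) for j in range(len(arr[0]))]
--     if axis == 1:
--         return [sum(row) for row in arr]
--     raise ValueError("axis out of bounds for 2-dimensional input")
-- ===== Notes on version B (the rewrite author's own statement) =====
-- stated objective: simpler
-- what changed: Replaces the depth-threading recursion with pairwise list-add folds by a flat two-branch form: axis 0 computes each column sum directly by index, axis 1 sums each row with the builtin sum; no helper recursion and no elementwise add remain.
-- outside the precondition, e.g. on sum_along(2, []): A returns [], B raises ValueError; on sum_along(2, [[], []]): A returns [[], []], B raises ValueError
import Mathlib
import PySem

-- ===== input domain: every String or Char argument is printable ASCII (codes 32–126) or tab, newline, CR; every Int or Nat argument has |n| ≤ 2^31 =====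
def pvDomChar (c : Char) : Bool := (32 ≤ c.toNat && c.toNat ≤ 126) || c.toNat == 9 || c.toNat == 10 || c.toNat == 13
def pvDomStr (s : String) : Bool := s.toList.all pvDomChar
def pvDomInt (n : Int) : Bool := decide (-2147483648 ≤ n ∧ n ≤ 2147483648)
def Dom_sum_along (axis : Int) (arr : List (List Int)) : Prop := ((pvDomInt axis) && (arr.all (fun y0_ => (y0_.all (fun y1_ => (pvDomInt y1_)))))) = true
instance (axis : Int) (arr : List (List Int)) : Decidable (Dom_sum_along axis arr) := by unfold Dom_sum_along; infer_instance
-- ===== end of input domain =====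

-- B is a flat two-branch reformulation (direct column sums / builtin row sums) of A's
-- depth-threading recursion with an elementwise-add fold; equivalence of return values on Pre_.

-- ===== PORT A =====
-- add(a, b): [add(a[i], b[i]) for i in range(len(a))]; at this depth elements are ints, so a[i] + b[i].
-- b[i] raises IndexError when len(b) < len(a): excluded by Pre_; getD 0 stands in there.
def pvAddA (a b : List Int) : List Int :=
  (List.range a.length).map (fun i => a.getD i 0 + b.getD i 0)

-- helper(axis, sub, 1) on a row: if 1 == axis fold int + over the row (sub[0] raises on an
-- empty row: excluded by Pre_); otherwise Python recurses into ints and raises TypeError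
-- (excluded by Pre_; 0 stands in).
def pvHelperRow (axis : Int) (sub : List Int) : Int :=
  if (1 : Int) = axis then
    match sub with
    | [] => 0
    | x :: rest => rest.foldl (· + ·) x
  else 0

-- helper(axis, arr, 0): if 0 == axis, result = arr[0]; for i in range(1, len(arr)): result = add(result, arr[i])
-- (arr[0] raises on []: excluded by Pre_); else [helper(axis, sub, 1) for sub in arr].
def sum_along (axis : Int) (arr : List (List Int)) : List Int :=
  if (0 : Int) = axis then
    match arr with
    | [] => []
    | r :: rest => rest.foldl pvAddA r
  else arr.map (pvHelperRow axis)

-- ===== PORT B =====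
-- sum(row[j] for row in arr), the builtin sum as a left fold from 0.
def pvColSum (arr : List (List Int)) (j : Nat) : Int :=
  arr.foldl (fun s row => s + row.getD j 0) 0

def sum_along_alt (axis : Int) (arr : List (List Int)) : List Int :=
  if axis = 0 then
    (List.range (arr.headD []).length).map (pvColSum arr)
  else if axis = 1 then
    arr.map (fun row => row.foldl (· + ·) 0)
  else []  -- Source B raises ValueError here; outside Pre_

-- ===== PRECONDITION & SPEC =====
-- Exactly the inputs where A returns: axis 0 needs a nonempty arr whose first row is no longer
-- than any row (else arr[0] / b[i] raises IndexError); axis 1 needs every row nonempty (else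
-- sub[0] raises IndexError); any other axis makes A recurse into ints and raise TypeError,
-- except vacuously when there is nothing to recurse into (axis∉{0,1} with an empty arr, where A
-- returns [], or with all rows empty, where A returns nested empty lists that are not a List Int):
-- those accidental vacuous values are excluded, B raises ValueError there.
def Pre_sum_along (axis : Int) (arr : List (List Int)) : Prop :=
  (axis = 0 ∧ arr ≠ [] ∧ ∀ row ∈ arr, (arr.headD []).length ≤ row.length) ∨
  (axis = 1 ∧ ∀ row ∈ arr, row ≠ [])
instance (axis : Int) (arr : List (List Int)) : Decidable (Pre_sum_along axis arr) := by
  unfold Pre_sum_along; infer_instance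

def pvWitness_sum_along : Int × List (List Int) := (0, [[1, 2], [3, 4]])

def Spec_sum_along (axis : Int) (arr : List (List Int)) (out : List Int) : Prop := out = sum_along_alt axis arr
instance (axis : Int) (arr : List (List Int)) (out : List Int) : Decidable (Spec_sum_along axis arr out) := by unfold Spec_sum_along; infer_instance

-- ===== CLAIM (what is proved, stated in full; the proofs are below) =====
def Claim_equal_sum_along : Prop := ∀ (axis : Int) (arr : List (List Int)), Dom_sum_along axis arr → Pre_sum_along axis arr → Spec_sum_along axis arr (sum_along axis arr)

-- ===== LEMMAS AND PROOFS =====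

theorem foldl_colShift (j : Nat) (c : Int) (l : List (List Int)) :
    l.foldl (fun s row => s + row[j]?.getD 0) c = c + l.foldl (fun s row => s + row[j]?.getD 0) 0 := by
  induction l generalizing c with
  | nil => simp
  | cons row rest ih =>
      simp only [List.foldl_cons]
      rw [ih (c + row[j]?.getD 0), ih (0 + row[j]?.getD 0)]
      ring

theorem pvAddA_length (a b : List Int) : (pvAddA a b).length = a.length := by
  simp [pvAddA]

theorem pvAddA_getD (a b : List Int) (j : Nat) (hj : j < a.length) :
    (pvAddA a b).getD j 0 = a.getD j 0 + b.getD j 0 := by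
  simp [pvAddA, List.getD_eq_getElem?_getD, hj]

-- The accumulator fold of A computes the per-index column sums of acc plus the rows of rest.
theorem foldl_addA_getD (rest : List (List Int)) (acc : List Int) (j : Nat)
    (hj : j < acc.length) :
    (rest.foldl pvAddA acc).getD j 0
      = acc.getD j 0 + rest.foldl (fun s row => s + row.getD j 0) 0 := by
  induction rest generalizing acc with
  | nil => simp
  | cons row rest ih =>
      have h1 : ((row :: rest).foldl pvAddA acc) = rest.foldl pvAddA (pvAddA acc row) := rfl
      rw [h1, ih (pvAddA acc row) (by rw [pvAddA_length]; exact hj), pvAddA_getD acc row j hj]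
      simp only [List.foldl_cons, List.getD_eq_getElem?_getD]
      rw [foldl_colShift j (0 + row[j]?.getD 0) rest]
      ring

theorem foldl_addA_length (rest : List (List Int)) (acc : List Int) :
    (rest.foldl pvAddA acc).length = acc.length := by
  induction rest generalizing acc with
  | nil => rfl
  | cons row rest ih => rw [List.foldl_cons, ih, pvAddA_length]

theorem sum_along_spec : Claim_equal_sum_along := by
  intro axis arr _hdom hpre
  unfold Spec_sum_along
  rcases hpre with ⟨hax, hne, _hlen⟩ | ⟨hax, hrows⟩
  · subst hax
    cases arr with
    | nil => exact absurd rfl hne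
    | cons r rest =>
        show (if (0:Int) = 0 then _ else _) = (if (0:Int) = 0 then _ else _)
        rw [if_pos rfl, if_pos rfl]
        apply List.ext_getElem
        · simp [foldl_addA_length]
        · intro j h1 h2
          have hj : j < r.length := by simpa [foldl_addA_length] using h1
          rw [← List.getD_eq_getElem _ 0 h1]
          rw [foldl_addA_getD rest r j hj]
          simp only [List.getElem_map, List.getElem_range, List.headD_cons, pvColSum,
            List.foldl_cons, List.getD_eq_getElem?_getD]
          rw [foldl_colShift j (0 + r[j]?.getD 0) rest]
          ring
  · subst hax
    show (if (0:Int) = 1 then _ else _) = (if (1:Int) = 0 then _ else _)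
    rw [if_neg (by norm_num), if_neg (by norm_num)]
    show _ = (if (1:Int) = 1 then _ else _)
    rw [if_pos rfl]
    apply List.map_congr_left
    intro row hrow
    cases row with
    | nil => exact absurd rfl (hrows [] hrow)
    | cons x xs => simp [pvHelperRow]
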